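-- pv_equiv track=rewrite | github.com/blythed/ochre | ochre/misc.py | replace_parameters
-- ===== SOURCE A (Python) =====
-- def replace_parameters(doc, placeholder: str = '!!!'):
--     """
--     Replace parameters in a doc-string with a placeholder.
--
--     :param doc: Sphinx-styled docstring.
--     :param placeholder: Placeholder to replace parameters with.
--     """
--     doc = [x.strip() for x in doc.split('\n')]
--     lines = []
--     had_parameters = False
--     parameters_done = False
--     for line in doc:
--         if parameters_done:
--             lines.append(line)
--             continue
--
--         if not had_parameters and line.startswith(':param'):
--             lines.append(placeholder)
--             had_parameters = True
--             assert not parameters_done, 'Can\'t have multiple parameter sections'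
--             continue
--
--         if had_parameters and line.startswith(':param'):
--             continue
--
--         if not line.strip() and had_parameters:
--             parameters_done = True
--
--         if had_parameters and not parameters_done:
--             continue
--
--         lines.append(line)
--
--     if not had_parameters:
--         lines = lines + ['\n' + placeholder]
--
--     return '\n'.join(lines)
-- ===== SOURCE B (Python) =====
-- def replace_parameters(doc, placeholder: str = '!!!'):
--     lines = [x.strip() for x in doc.split('\n')]
--     idx = next((i for i, l in enumerate(lines) if l.startswith(':param')), None)
--     if idx is None:
--         return '\n'.join(lines + ['\n' + placeholder])
--     j = next((i for i in range(idx, len(lines)) if not lines[i]), len(lines))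
--     return '\n'.join(lines[:idx] + [placeholder] + lines[j:])
-- ===== Notes on version B (the rewrite author's own statement) =====
-- stated objective: simpler
-- what changed: Replaces A's per-line state machine with two boolean flags by computing two indices (first ':param' line, first blank line at or after it) and assembling the result by list slicing.
import Mathlib
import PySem

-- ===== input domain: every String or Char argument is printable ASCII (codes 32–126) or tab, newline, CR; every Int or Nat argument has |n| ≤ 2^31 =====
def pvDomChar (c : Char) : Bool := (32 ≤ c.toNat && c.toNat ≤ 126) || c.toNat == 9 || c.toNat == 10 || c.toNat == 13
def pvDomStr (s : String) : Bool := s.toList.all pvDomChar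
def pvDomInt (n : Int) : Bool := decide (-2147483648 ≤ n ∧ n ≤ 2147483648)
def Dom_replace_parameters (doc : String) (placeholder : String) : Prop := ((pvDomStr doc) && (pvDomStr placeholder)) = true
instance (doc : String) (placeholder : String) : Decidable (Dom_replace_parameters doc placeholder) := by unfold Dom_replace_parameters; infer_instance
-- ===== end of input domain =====

-- B replaces A's per-line state machine (two boolean flags) by computing two indices (first
-- ':param' line, first blank line at or after it) and assembling the result by list slicing.

-- ===== PORT A =====
-- loop body of A's 'for line in doc:', state = (lines, had_parameters, parameters_done)
def pvStepA (placeholder : String) (st : List String × Bool × Bool) (line : String) : List String × Bool × Bool :=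
  let lines := st.1
  let had := st.2.1
  let done := st.2.2
  if done then (lines ++ [line], had, done)
  else if !had && PySem.Str.startswith line ":param" then (lines ++ [placeholder], true, done)
  else if had && PySem.Str.startswith line ":param" then (lines, had, done)
  else
    -- 'if not line.strip() and had_parameters: parameters_done = True'
    let done1 := if (PySem.Str.strip line == "") && had then true else done
    if had && !done1 then (lines, had, done1)
    else (lines ++ [line], had, done1)

def replace_parameters (doc : String) (placeholder : String) : String :=
  let docL := ((PySem.Str.split? doc "\n").getD []).map PySem.Str.strip  -- split never raises: sep ≠ ""
  let st := docL.foldl (pvStepA placeholder) ([], false, false)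
  let lines := if !st.2.1 then st.1 ++ ["\n" ++ placeholder] else st.1
  PySem.Str.join "\n" lines

-- ===== PORT B =====
def replace_parameters_alt (doc : String) (placeholder : String) : String :=
  let lines := ((PySem.Str.split? doc "\n").getD []).map PySem.Str.strip
  match lines.findIdx? (fun l => PySem.Str.startswith l ":param") with
  | none => PySem.Str.join "\n" (lines ++ ["\n" ++ placeholder])
  | some idx =>
    let j := match (lines.drop idx).findIdx? (fun l => l == "") with
             | none => lines.length
             | some k => idx + k
    PySem.Str.join "\n" (lines.take idx ++ [placeholder] ++ lines.drop j)

-- ===== PRECONDITION & SPEC =====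
def Spec_replace_parameters (doc : String) (placeholder : String) (out : String) : Prop := out = replace_parameters_alt doc placeholder
instance (doc : String) (placeholder : String) (out : String) : Decidable (Spec_replace_parameters doc placeholder out) := by unfold Spec_replace_parameters; infer_instance

-- ===== CLAIM (what is proved, stated in full; the proofs are below) =====
def Claim_equal_replace_parameters : Prop := ∀ (doc : String) (placeholder : String), Dom_replace_parameters doc placeholder → Spec_replace_parameters doc placeholder (replace_parameters doc placeholder)

-- ===== LEMMAS AND PROOFS =====

lemma pv_findIdx?_cons_pos {α : Type} (p : α → Bool) (a : α) (t : List α) (h : p a = true) :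
    List.findIdx? p (a :: t) = some 0 := by
  rw [List.findIdx?_cons, if_pos h]

lemma pv_findIdx?_cons_neg {α : Type} (p : α → Bool) (a : α) (t : List α) (h : p a = false) :
    List.findIdx? p (a :: t) = (List.findIdx? p t).map (· + 1) := by
  rw [List.findIdx?_cons, if_neg (by simp [h])]

lemma pv_dropWhile_idem {α : Type} (p : α → Bool) (l : List α) :
    List.dropWhile p (List.dropWhile p l) = List.dropWhile p l := by
  induction l with
  | nil => simp
  | cons a t ih =>
    by_cases h : p a = true <;> simp [h, ih]

lemma pv_dropWhile_head_false {α : Type} (p : α → Bool) :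
    ∀ (l : List α) (a : α) (t : List α), List.dropWhile p l = a :: t → p a = false := by
  intro l
  induction l with
  | nil => intro a t h; simp at h
  | cons x xs ih =>
    intro a t h
    rw [List.dropWhile_cons] at h
    split at h
    · exact ih a t h
    · next hc =>
      injection h with h1 _
      subst h1
      simpa using hc

lemma pv_lstrip_rstrip_lstrip (s : List Char) :
    PySem.Chars.lstrip (PySem.Chars.rstrip (PySem.Chars.lstrip s)) =
      PySem.Chars.rstrip (PySem.Chars.lstrip s) := by
  rcases hu : PySem.Chars.lstrip s with _ | ⟨a, t⟩
  · simp [PySem.Chars.rstrip, PySem.Chars.lstrip]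
  · have ha : PySem.Chars.isspace a = false := by
      simp only [PySem.Chars.lstrip] at hu
      exact pv_dropWhile_head_false _ s a t hu
    simp only [PySem.Chars.rstrip, PySem.Chars.lstrip]
    rw [List.reverse_cons, List.dropWhile_append]
    by_cases he : (List.dropWhile PySem.Chars.isspace t.reverse).isEmpty
    · simp [he, ha]
    · simp [he, ha]

lemma pv_chars_strip_idem (s : List Char) :
    PySem.Chars.strip (PySem.Chars.strip s) = PySem.Chars.strip s := by
  show PySem.Chars.rstrip (PySem.Chars.lstrip (PySem.Chars.rstrip (PySem.Chars.lstrip s)))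
      = PySem.Chars.rstrip (PySem.Chars.lstrip s)
  rw [pv_lstrip_rstrip_lstrip]
  simp only [PySem.Chars.rstrip]
  rw [List.reverse_reverse, pv_dropWhile_idem]

lemma pv_str_strip_idem (s : String) :
    PySem.Str.strip (PySem.Str.strip s) = PySem.Str.strip s := by
  simp only [PySem.Str.strip]
  rw [String.toList_ofList, pv_chars_strip_idem]

lemma pv_param_ne_empty {l : String} (h : PySem.Str.startswith l ":param" = true) :
    (l == "") = false := by
  by_cases hbe : (l == "") = true
  · have : l = "" := eq_of_beq hbe
    subst this
    exact absurd h (by decide)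
  · simpa using hbe

lemma pv_findIdx?_some_spec {α : Type} (p : α → Bool) :
    ∀ (L : List α) (i : Nat), L.findIdx? p = some i → ∃ h : i < L.length, p (L[i]'h) = true := by
  intro L
  induction L with
  | nil => intro i h; simp at h
  | cons a t ih =>
    intro i h
    by_cases hp : p a = true
    · rw [pv_findIdx?_cons_pos p a t hp] at h
      injection h with h'
      subst h'
      exact ⟨Nat.succ_pos t.length, by simpa using hp⟩
    · rw [pv_findIdx?_cons_neg p a t (by simpa using hp)] at h
      rw [Option.map_eq_some_iff] at h
      rcases h with ⟨i', hi', rfl⟩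
      rcases ih i' hi' with ⟨hlt, hpi⟩
      exact ⟨by simpa using Nat.succ_lt_succ hlt, by simpa using hpi⟩

-- Phase 3 of A's loop: parameters_done = true appends everything.
lemma pv_done_phase (ph : String) (L : List String) :
    ∀ (acc : List String) (had : Bool),
      L.foldl (pvStepA ph) (acc, had, true) = (acc ++ L, had, true) := by
  induction L with
  | nil => intro acc had; simp
  | cons l t ih =>
    intro acc had
    simp only [List.foldl_cons, pvStepA]
    simpa using ih (acc ++ [l]) had

-- Phase 2: had_parameters = true, parameters_done = false: skip until the first blank line,
-- which is kept, then everything after it is kept.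
lemma pv_had_phase (ph : String) (L : List String) :
    ∀ (acc : List String), (∀ l ∈ L, PySem.Str.strip l = l) →
      L.foldl (pvStepA ph) (acc, true, false) =
        (match L.findIdx? (fun l => l == "") with
         | none => (acc, true, false)
         | some k => (acc ++ L.drop k, true, true)) := by
  induction L with
  | nil => intro acc _; simp
  | cons l t ih =>
    intro acc hL
    have hsl : PySem.Str.strip l = l := hL l (by simp)
    have htail : ∀ x ∈ t, PySem.Str.strip x = x := fun x hx => hL x (by simp [hx])
    by_cases hb : (l == "") = true
    · -- blank line: appended, parameters_done becomes true
      have hl0 : l = "" := eq_of_beq hb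
      subst hl0
      have hstep : pvStepA ph (acc, true, false) "" = (acc ++ [""], true, true) := rfl
      rw [List.foldl_cons, hstep, pv_done_phase ph t (acc ++ [""]) true,
          pv_findIdx?_cons_pos (fun l => l == "") "" t (by decide)]
      simp
    · have hb' : (l == "") = false := by simpa using hb
      by_cases hP : PySem.Str.startswith l ":param" = true
      · -- ':param' line: skipped
        have hstep : pvStepA ph (acc, true, false) l = (acc, true, false) := by
          simp only [pvStepA]
          rw [hP]
          simp
        rw [List.foldl_cons, hstep, ih acc htail,
            pv_findIdx?_cons_neg (fun l => l == "") l t hb']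
        cases hfi : t.findIdx? (fun l => l == "") with
        | none => rfl
        | some k => simp
      · -- ordinary line inside the parameter block: skipped
        have hP' : PySem.Str.startswith l ":param" = false := by simpa using hP
        have hstep : pvStepA ph (acc, true, false) l = (acc, true, false) := by
          simp only [pvStepA]
          rw [hP', hsl, hb']
          simp
        rw [List.foldl_cons, hstep, ih acc htail,
            pv_findIdx?_cons_neg (fun l => l == "") l t hb']
        cases hfi : t.findIdx? (fun l => l == "") with
        | none => rfl
        | some k => simp

-- Phase 1, no ':param' anywhere: everything is appended, flags stay false.
lemma pv_pre_none (ph : String) (L : List String) :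
    ∀ (acc : List String), (∀ l ∈ L, PySem.Str.startswith l ":param" = false) →
      L.foldl (pvStepA ph) (acc, false, false) = (acc ++ L, false, false) := by
  induction L with
  | nil => intro acc _; simp
  | cons l t ih =>
    intro acc hL
    have hP := hL l (by simp)
    have hstep : pvStepA ph (acc, false, false) l = (acc ++ [l], false, false) := by
      simp only [pvStepA]
      rw [hP]
      simp
    rw [List.foldl_cons, hstep]
    simpa using ih (acc ++ [l]) (fun x hx => hL x (by simp [hx]))

-- Phase 1, first ':param' at index i: prefix appended, placeholder appended, then phase 2.
lemma pv_pre_some (ph : String) (L : List String) :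
    ∀ (acc : List String) (i : Nat),
      L.findIdx? (fun l => PySem.Str.startswith l ":param") = some i →
      L.foldl (pvStepA ph) (acc, false, false) =
        (L.drop (i + 1)).foldl (pvStepA ph) (acc ++ L.take i ++ [ph], true, false) := by
  induction L with
  | nil => intro acc i h; simp at h
  | cons l t ih =>
    intro acc i h
    by_cases hP : PySem.Str.startswith l ":param" = true
    · rw [pv_findIdx?_cons_pos (fun l => PySem.Str.startswith l ":param") l t hP] at h
      injection h with h'
      subst h'
      have hstep : pvStepA ph (acc, false, false) l = (acc ++ [ph], true, false) := by
        simp only [pvStepA]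
        rw [hP]
        simp
      rw [List.foldl_cons, hstep]
      simp
    · have hP' : PySem.Str.startswith l ":param" = false := by simpa using hP
      rw [pv_findIdx?_cons_neg (fun l => PySem.Str.startswith l ":param") l t hP'] at h
      rw [Option.map_eq_some_iff] at h
      rcases h with ⟨i', hi', rfl⟩
      have hstep : pvStepA ph (acc, false, false) l = (acc ++ [l], false, false) := by
        simp only [pvStepA]
        rw [hP']
        simp
      rw [List.foldl_cons, hstep, ih (acc ++ [l]) i' hi']
      simp

-- The two line lists agree.
lemma pv_lists_eq (ph : String) (L : List String) (hL : ∀ l ∈ L, PySem.Str.strip l = l) :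
    (if !(L.foldl (pvStepA ph) ([], false, false)).2.1
       then (L.foldl (pvStepA ph) ([], false, false)).1 ++ ["\n" ++ ph]
       else (L.foldl (pvStepA ph) ([], false, false)).1) =
    (match L.findIdx? (fun l => PySem.Str.startswith l ":param") with
     | none => L ++ ["\n" ++ ph]
     | some idx =>
       L.take idx ++ [ph] ++
         L.drop (match (L.drop idx).findIdx? (fun l => l == "") with
                 | none => L.length
                 | some k => idx + k)) := by
  cases hfi : L.findIdx? (fun l => PySem.Str.startswith l ":param") with
  | none =>
    have hno : ∀ l ∈ L, PySem.Str.startswith l ":param" = false := by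
      intro l hl
      have := List.findIdx?_eq_none_iff.mp hfi
      simpa using this l hl
    rw [pv_pre_none ph L [] hno]
    simp
  | some i =>
    rcases pv_findIdx?_some_spec _ L i hfi with ⟨hlt, hpi⟩
    have hdrop : L[i] :: L.drop (i + 1) = L.drop i := List.getElem_cons_drop hlt
    have hblank : (L[i] == "") = false := pv_param_ne_empty hpi
    have hfb : (L.drop i).findIdx? (fun l => l == "") =
        ((L.drop (i + 1)).findIdx? (fun l => l == "")).map (· + 1) := by
      conv_lhs => rw [← hdrop]
      exact pv_findIdx?_cons_neg (fun l => l == "") (L[i]) (L.drop (i + 1)) hblank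
    rw [pv_pre_some ph L [] i hfi]
    rw [pv_had_phase ph (L.drop (i + 1)) ([] ++ L.take i ++ [ph])
          (fun x hx => hL x (List.mem_of_mem_drop hx))]
    simp only [hfb]
    cases hk : (L.drop (i + 1)).findIdx? (fun l => l == "") with
    | none =>
      simp [List.drop_length]
    | some k =>
      have hdd : L.drop (i + (k + 1)) = (L.drop (i + 1)).drop k := by
        rw [List.drop_drop]
        congr 1
        omega
      simp [hdd]

-- ===== VERDICT (by name: the statement is the Claim_ definition above) =====
theorem replace_parameters_spec : Claim_equal_replace_parameters := by
  intro doc ph _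
  show replace_parameters doc ph = replace_parameters_alt doc ph
  have hL : ∀ l ∈ ((PySem.Str.split? doc "\n").getD []).map PySem.Str.strip,
      PySem.Str.strip l = l := by
    intro l hl
    rcases List.mem_map.mp hl with ⟨x, _, rfl⟩
    exact pv_str_strip_idem x
  simp only [replace_parameters, replace_parameters_alt]
  rw [pv_lists_eq ph _ hL]
  cases h : (((PySem.Str.split? doc "\n").getD []).map PySem.Str.strip).findIdx?
      (fun l => PySem.Str.startswith l ":param") with
  | none => simp
  | some i => simp
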